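-- pv_equiv track=rewrite | github.com/shrreku/tutorAI | backend/app/services/notebook_planning.py | _stringify_list
-- ===== SOURCE A (Python) =====
-- from typing import Any, Optional
--
-- def _stringify_list(values: list[Any] | None) -> list[str]:
--     seen: set[str] = set()
--     normalized: list[str] = []
--     for value in values or []:
--         if value is None:
--             continue
--         text = str(value)
--         if not text or text in seen:
--             continue
--         seen.add(text)
--         normalized.append(text)
--     return normalized
-- ===== SOURCE B (Python) =====
-- def _stringify_list(values):
--     first = {}
--     for i, v in enumerate(values or []):
--         if v is not None:
--             t = str(v)
--             if t:
--                 first.setdefault(t, i)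
--     return [t for t, _ in sorted(first.items(), key=lambda kv: kv[1])]
-- ===== Notes on version B (the rewrite author's own statement) =====
-- stated objective: alternative
-- what changed: Instead of A's online seen-set/membership-branch/append loop, B records each nonempty string's first-occurrence index in a dict via setdefault and then reconstructs the output by sorting the items by that index.
import Mathlib
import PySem

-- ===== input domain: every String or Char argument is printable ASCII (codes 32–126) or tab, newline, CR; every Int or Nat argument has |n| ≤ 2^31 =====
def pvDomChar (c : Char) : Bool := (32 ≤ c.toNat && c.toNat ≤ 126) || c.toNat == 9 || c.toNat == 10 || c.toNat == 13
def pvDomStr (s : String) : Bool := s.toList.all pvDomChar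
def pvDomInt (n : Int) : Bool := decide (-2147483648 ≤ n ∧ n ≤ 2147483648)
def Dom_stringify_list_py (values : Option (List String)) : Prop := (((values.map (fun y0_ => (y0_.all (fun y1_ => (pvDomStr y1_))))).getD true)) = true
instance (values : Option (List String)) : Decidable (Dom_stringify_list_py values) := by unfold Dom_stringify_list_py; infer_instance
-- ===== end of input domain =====

-- B records the first-occurrence index of each nonempty string in a dict via setdefault,
-- then sorts the items by that index — a staged index-map + sort algorithm instead of A's
-- online seen-set/append loop (alternative decomposition, similar cost).


-- ===== PORT A =====
-- Elements are typed String, so 'value is None' never fires and str(value) = value.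
def stringify_list_py (values : Option (List String)) : List String :=
  (((values.getD []).foldl
    (fun (st : PySem.Set String × List String) value =>
      let text := value
      if text = "" || PySem.Set.contains st.1 text then st
      else (PySem.Set.add st.1 text, st.2 ++ [text]))
    (PySem.Set.empty, []))).2

-- ===== PORT B =====
-- first = {}; for i, v in enumerate(values or []): if v is not None: t = str(v); if t: first.setdefault(t, i)
-- return [t for t, _ in sorted(first.items(), key=lambda kv: kv[1])]
-- (elements are typed String, so 'v is not None' is always true and str(v) = v)
def stringify_list_py_alt (values : Option (List String)) : List String :=
  (PySem.List.sorted
    (((PySem.List.enumerate (values.getD [])).foldl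
      (fun (d : PySem.Dict String Int) p =>
        if p.2 ≠ "" then PySem.Dict.setdefault d p.2 p.1 else d)
      PySem.Dict.empty).items)
    (fun kv => kv.2) false).map (fun kv => kv.1)

-- ===== PRECONDITION & SPEC =====
def Spec_stringify_list_py (values : Option (List String)) (out : List String) : Prop := out = stringify_list_py_alt values
instance (values : Option (List String)) (out : List String) : Decidable (Spec_stringify_list_py values out) := by unfold Spec_stringify_list_py; infer_instance

-- ===== CLAIM (what is proved, stated in full; the proofs are below) =====
def Claim_equal_stringify_list_py : Prop := ∀ (values : Option (List String)), Dom_stringify_list_py values → Spec_stringify_list_py values (stringify_list_py values)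

-- ===== LEMMAS AND PROOFS =====
-- Common reference: first occurrences of non-empty elements not already in 'seen'.
def firstOcc (seen : List String) : List String → List String
  | [] => []
  | x :: xs => if x = "" ∨ x ∈ seen then firstOcc seen xs else x :: firstOcc (x :: seen) xs

lemma firstOcc_congr (s s' : List String) (xs : List String)
    (h : ∀ t, t ≠ "" → (t ∈ s ↔ t ∈ s')) : firstOcc s xs = firstOcc s' xs := by
  induction xs generalizing s s' with
  | nil => rfl
  | cons x xs ih =>
    by_cases hx : x = ""
    · simp [firstOcc, hx, ih s s' h]
    · have hm := h x hx
      by_cases hxs : x ∈ s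
      · simp [firstOcc, hx, hxs, hm.mp hxs, ih s s' h]
      · have hxs' : x ∉ s' := fun hc => hxs (hm.mpr hc)
        have h' : ∀ t, t ≠ "" → (t ∈ x :: s ↔ t ∈ x :: s') := by
          intro t ht; simp [h t ht]
        simp [firstOcc, hx, hxs, hxs', ih (x :: s) (x :: s') h']

-- A's loop, generalized over seen set and accumulator.
lemma loopA (xs : List String) (s : PySem.Set String) (a : List String) :
    ((xs.foldl
      (fun (st : PySem.Set String × List String) value =>
        let text := value
        if text = "" || PySem.Set.contains st.1 text then st
        else (PySem.Set.add st.1 text, st.2 ++ [text]))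
      (s, a))).2 = a ++ firstOcc s xs := by
  induction xs generalizing s a with
  | nil => simp [firstOcc]
  | cons x xs ih =>
    rw [List.foldl_cons]
    rw [show (let text := x;
        if (decide (text = "") || PySem.Set.contains (s, a).1 text) = true then (s, a)
        else (PySem.Set.add (s, a).1 text, (s, a).2 ++ [text]))
        = if x = "" ∨ x ∈ s then (s, a) else (s ++ [x], a ++ [x]) from by
      by_cases hx : x = "" <;> by_cases hc : x ∈ s <;>
        simp [PySem.Set.contains, PySem.Set.add, hx, hc]]
    by_cases h : x = "" ∨ x ∈ s
    · rw [if_pos h, ih]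
      simp [firstOcc, h]
    · rw [if_neg h, ih (s ++ [x]) (a ++ [x])]
      have hcg : firstOcc (s ++ [x]) xs = firstOcc (x :: s) xs :=
        firstOcc_congr _ _ _ (by intro t _; simp [or_comm])
      simp [firstOcc, h, hcg]

-- B's dict-building loop: starting from a dict whose values are all below the next
-- index, it appends exactly the first occurrences of the remaining nonempty strings,
-- and the item values stay strictly increasing.
lemma loopB (xs : List String) (i : Int) (d : PySem.Dict String Int)
    (hlt : ∀ p ∈ d.items, p.2 < i)
    (hpair : (d.items.map Prod.snd).Pairwise (· < ·)) :
    (((PySem.List.enumerate xs i).foldl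
      (fun (d : PySem.Dict String Int) p =>
        if p.2 ≠ "" then PySem.Dict.setdefault d p.2 p.1 else d) d)).items.map Prod.fst
        = d.items.map Prod.fst ++ firstOcc (d.items.map Prod.fst) xs
    ∧ ((((PySem.List.enumerate xs i).foldl
      (fun (d : PySem.Dict String Int) p =>
        if p.2 ≠ "" then PySem.Dict.setdefault d p.2 p.1 else d) d)).items.map Prod.snd).Pairwise (· < ·) := by
  induction xs generalizing i d with
  | nil => simp [PySem.List.enumerate, firstOcc, hpair]
  | cons x xs ih =>
    rw [PySem.List.enumerate_cons, List.foldl_cons]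
    have hkeys : d.keys = d.items.map Prod.fst := by simp only [PySem.Dict.keys]
    by_cases hx : x = ""
    · have hstep : (if (x ≠ "") then PySem.Dict.setdefault d x i else d) = d := by simp [hx]
      have hrec := ih (i + 1) d (fun p hp => lt_trans (hlt p hp) (by omega)) hpair
      simp only [hstep] at *
      refine ⟨?_, hrec.2⟩
      rw [hrec.1, firstOcc]
      simp [hx]
    · by_cases hc : x ∈ d.items.map Prod.fst
      · have hcon : d.contains x = true := by
          rw [PySem.Dict.contains_iff_mem_keys, hkeys]; exact hc
        have hstep : (if (x ≠ "") then PySem.Dict.setdefault d x i else d) = d := by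
          simp only [hx, ne_eq, not_false_iff, if_pos]
          simp [PySem.Dict.setdefault, hcon]
        have hrec := ih (i + 1) d (fun p hp => lt_trans (hlt p hp) (by omega)) hpair
        simp only [hstep] at *
        refine ⟨?_, hrec.2⟩
        rw [hrec.1, firstOcc]
        simp [hx, hc]
      · have hcon : d.contains x = false := by
          rw [Bool.eq_false_iff]
          intro h
          exact hc (hkeys ▸ (PySem.Dict.contains_iff_mem_keys d x).mp h)
        have hstep : (if (x ≠ "") then PySem.Dict.setdefault d x i else d)
            = d.insert x i := by
          simp only [hx, ne_eq, not_false_iff, if_pos]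
          simp [PySem.Dict.setdefault_of_not_contains, hcon]
        have hitems : (d.insert x i).items = d.items ++ [(x, i)] := by
          simp [PySem.Dict.items_insert, hcon]
        have hlt' : ∀ p ∈ (d.insert x i).items, p.2 < i + 1 := by
          intro p hp
          rw [hitems] at hp
          rcases List.mem_append.mp hp with hp | hp
          · exact lt_trans (hlt p hp) (by omega)
          · rw [List.mem_singleton] at hp
            subst hp
            omega
        have hpair' : ((d.insert x i).items.map Prod.snd).Pairwise (· < ·) := by
          rw [hitems, List.map_append]
          rw [List.pairwise_append]
          refine ⟨hpair, by simp, ?_⟩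
          intro a ha b hb
          simp at hb
          subst hb
          rcases List.mem_map.mp ha with ⟨p, hp, hpa⟩
          exact hpa ▸ hlt p hp
        have hrec := ih (i + 1) (d.insert x i) hlt' hpair'
        rw [hstep]
        refine ⟨?_, hrec.2⟩
        rw [hrec.1, hitems, List.map_append]
        have hcg : firstOcc (d.items.map Prod.fst ++ [x]) xs
            = firstOcc (x :: d.items.map Prod.fst) xs :=
          firstOcc_congr _ _ _ (by intro t _; simp [or_comm])
        simp [firstOcc, hx, hc, hcg]

-- The item values are strictly increasing, so the stable sort by value is the identity.
lemma sorted_items_id (l : List (String × Int))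
    (hpair : (l.map Prod.snd).Pairwise (· < ·)) :
    PySem.List.sorted l (fun kv => kv.2) false = l := by
  apply PySem.List.sorted_eq_of_perm_of_pairwise_lt
  · exact List.Perm.refl l
  · exact (List.pairwise_map.mp hpair)

-- ===== VERDICT (by name: the statement is the Claim_ definition above) =====
theorem stringify_list_py_spec : Claim_equal_stringify_list_py := by
  intro values _
  show stringify_list_py values = stringify_list_py_alt values
  have hempty : (PySem.Dict.empty : PySem.Dict String Int).items = [] := rfl
  have hB := loopB (values.getD []) 0 PySem.Dict.empty
    (by intro p hp; rw [hempty] at hp; exact absurd hp (List.not_mem_nil))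
    (by rw [hempty]; simp)
  simp only [hempty, List.map_nil, List.nil_append] at hB
  unfold stringify_list_py stringify_list_py_alt
  rw [loopA]
  rw [sorted_items_id _ hB.2]
  rw [List.nil_append]
  have he : (PySem.Set.empty : List String) = [] := rfl
  rw [he]
  exact hB.1.symm
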